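-- pv_equiv track=rewrite | github.com/TheDeepFreeze/advent-of-code | day9/day9.py | updatefree
-- ===== SOURCE A (Python) =====
-- def updatefree(files):
--     free = []
--     freefound = False
--     start = 0
--     for i in range(len(files)):
--         cur = files[i]
--
--         if not freefound and cur == ".":
--             start = i
--             freefound = True
--         elif freefound:
--             if cur != ".":
--                 free.append([i - start, start])
--                 freefound = False
--     return free
-- ===== SOURCE B (Python) =====
-- def updatefree(files):
--     # Gap view: free segments are exactly the gaps between consecutive non-dot
--     # indices (with a virtual non-dot at -1); trailing dots have no terminator
--     # and are thus naturally omitted, as in the original.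
--     solid = [i for i, c in enumerate(files) if c != "."]
--     free = []
--     prev = -1
--     for p in solid:
--         if p - prev > 1:
--             free.append([p - prev - 1, prev + 1])
--         prev = p
--     return free
-- ===== Notes on version B (the rewrite author's own statement) =====
-- stated objective: alternative
-- what changed: Instead of A's single pass with a boolean in-run flag and recorded start, B first materialises the list of non-dot indices and then emits each gap between consecutive non-dot indices (with a virtual one at -1) as a free segment; trailing free space is omitted because it has no terminating non-dot index.
import Mathlib
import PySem

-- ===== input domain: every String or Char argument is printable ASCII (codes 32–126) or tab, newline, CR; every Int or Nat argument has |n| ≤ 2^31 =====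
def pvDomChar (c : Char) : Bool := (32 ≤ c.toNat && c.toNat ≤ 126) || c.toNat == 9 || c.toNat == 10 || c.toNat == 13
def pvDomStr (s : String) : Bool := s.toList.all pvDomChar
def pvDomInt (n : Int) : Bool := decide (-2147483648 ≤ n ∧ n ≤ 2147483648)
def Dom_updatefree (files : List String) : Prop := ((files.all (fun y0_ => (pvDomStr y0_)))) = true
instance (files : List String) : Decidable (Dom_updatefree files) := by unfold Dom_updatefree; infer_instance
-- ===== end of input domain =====

-- B is an alternative of the same cost: it first materialises the non-dot ("solid") indices and
-- then emits the gaps between consecutive solid indices, instead of A's boolean-flag state machine.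

-- ===== PORT A =====
-- A's for-loop over range(len(files)) as structural recursion over the list with the
-- same state (free, freefound, start) and the running index i.
def updatefreeLoop : List String → List (List Int) → Bool → Int → Int → List (List Int)
  | [], free, _, _, _ => free
  | cur :: rest, free, freefound, start, i =>
    if !freefound && cur == "." then
      updatefreeLoop rest free true i (i + 1)
    else if freefound then
      if cur != "." then
        updatefreeLoop rest (free ++ [[i - start, start]]) false start (i + 1)
      else
        updatefreeLoop rest free freefound start (i + 1)
    else
      updatefreeLoop rest free freefound start (i + 1)

def updatefree (files : List String) : List (List Int) :=
  updatefreeLoop files [] false 0 0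

-- ===== PORT B =====
-- Source B line by line: the comprehension over enumerate(files), then the for-loop over
-- solid with state (free, prev) as a foldl.
def updatefree_alt (files : List String) : List (List Int) :=
  let solid : List Int :=
    ((PySem.List.enumerate files 0).filter (fun p => p.2 != ".")).map (fun p => p.1)
  (solid.foldl
    (fun (st : List (List Int) × Int) p =>
      if p - st.2 > 1 then (st.1 ++ [[p - st.2 - 1, st.2 + 1]], p) else (st.1, p))
    ([], -1)).1

-- ===== PRECONDITION & SPEC =====
def Spec_updatefree (files : List String) (out : List (List Int)) : Prop := out = updatefree_alt files
instance (files : List String) (out : List (List Int)) : Decidable (Spec_updatefree files out) := by unfold Spec_updatefree; infer_instance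

-- ===== CLAIM (what is proved, stated in full; the proofs are below) =====
def Claim_equal_updatefree : Prop := ∀ (files : List String), Dom_updatefree files → Spec_updatefree files (updatefree files)

-- ===== LEMMAS AND PROOFS =====

-- proof-side recursive form of B's gap loop
def gapLoop : List Int → Int → List (List Int)
  | [], _ => []
  | p :: ps, prev =>
    if p - prev > 1 then [p - prev - 1, prev + 1] :: gapLoop ps p else gapLoop ps p

-- proof-side recursive form of B's solid-index list, with running start index
def solidIdx : List String → Int → List Int
  | [], _ => []
  | x :: xs, i => if x = "." then solidIdx xs (i + 1) else i :: solidIdx xs (i + 1)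

lemma solidIdx_eq (l : List String) : ∀ i,
    ((PySem.List.enumerate l i).filter (fun p => p.2 != ".")).map (fun p => p.1)
      = solidIdx l i := by
  induction l with
  | nil => intro i; simp [solidIdx, PySem.List.enumerate_nil]
  | cons x xs ih =>
    intro i
    rw [PySem.List.enumerate_cons]
    by_cases hx : x = "."
    · simp [solidIdx, hx, ih]
    · simp [solidIdx, hx, ih]

lemma foldl_gap (ps : List Int) : ∀ (free : List (List Int)) (prev : Int),
    (ps.foldl
      (fun (st : List (List Int) × Int) p =>
        if p - st.2 > 1 then (st.1 ++ [[p - st.2 - 1, st.2 + 1]], p) else (st.1, p))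
      (free, prev)).1 = free ++ gapLoop ps prev := by
  induction ps with
  | nil => intro free prev; simp [gapLoop]
  | cons p ps ih =>
    intro free prev
    simp only [List.foldl_cons, gapLoop]
    by_cases h : p - prev > 1
    · rw [if_pos h, if_pos h, ih]; simp
    · rw [if_neg h, if_neg h, ih]

-- A's state machine equals the gap scan: started outside a run A matches gapLoop with
-- prev = i - 1; inside a run that began at start it matches gapLoop with prev = start - 1.
lemma updatefree_main (l : List String) :
    (∀ (free : List (List Int)) (s i : Int),
      updatefreeLoop l free false s i = free ++ gapLoop (solidIdx l i) (i - 1)) ∧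
    (∀ (free : List (List Int)) (st i : Int), st < i →
      updatefreeLoop l free true st i = free ++ gapLoop (solidIdx l i) (st - 1)) := by
  induction l with
  | nil => exact ⟨fun free s i => by simp [updatefreeLoop, solidIdx, gapLoop],
             fun free st i _ => by simp [updatefreeLoop, solidIdx, gapLoop]⟩
  | cons x xs ih =>
    obtain ⟨ih1, ih2⟩ := ih
    constructor
    · intro free s i
      by_cases hx : x = "."
      · subst hx
        have step : updatefreeLoop ("." :: xs) free false s i
            = updatefreeLoop xs free true i (i + 1) := by simp [updatefreeLoop]
        rw [step, ih2 free i (i + 1) (by omega)]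
        simp [solidIdx]
      · have hx' : (x == ".") = false := by simpa using hx
        have step : updatefreeLoop (x :: xs) free false s i
            = updatefreeLoop xs free false s (i + 1) := by
          simp [updatefreeLoop, hx']
        rw [step, ih1 free s (i + 1)]
        have : gapLoop (i :: solidIdx xs (i + 1)) (i - 1)
            = gapLoop (solidIdx xs (i + 1)) i := by
          simp only [gapLoop]
          rw [if_neg (by omega)]
        simp [solidIdx, hx, this]
    · intro free st i hlt
      by_cases hx : x = "."
      · subst hx
        have step : updatefreeLoop ("." :: xs) free true st i
            = updatefreeLoop xs free true st (i + 1) := by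
          simp [updatefreeLoop]
        rw [step, ih2 free st (i + 1) (by omega)]
        simp [solidIdx]
      · have hx' : (x == ".") = false := by simpa using hx
        have step : updatefreeLoop (x :: xs) free true st i
            = updatefreeLoop xs (free ++ [[i - st, st]]) false st (i + 1) := by
          simp [updatefreeLoop, hx', bne]
        rw [step, ih1 _ st (i + 1)]
        have : gapLoop (i :: solidIdx xs (i + 1)) (st - 1)
            = [i - st, st] :: gapLoop (solidIdx xs (i + 1)) i := by
          simp only [gapLoop]
          rw [if_pos (by omega)]
          rw [show i - (st - 1) - 1 = i - st by ring, show st - 1 + 1 = st by ring]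
        simp [solidIdx, hx, this]

-- ===== VERDICT (by name: the statement is the Claim_ definition above) =====
theorem updatefree_spec : Claim_equal_updatefree := by
  intro files _
  unfold Spec_updatefree updatefree updatefree_alt
  rw [solidIdx_eq, foldl_gap, (updatefree_main files).1]
  norm_num
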